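-- pv_equiv track=rewrite | github.com/dc-77/vectiscan | report-worker/reporter/tr03116_checker.py | _check_tls_versions
-- ===== SOURCE A (Python) =====
-- from typing import Any
--
-- def _find(findings: list[dict[str, Any]], target_id: str) -> dict[str, Any] | None:
--     """Find a testssl entry by id (case-insensitive).
--
--     Handles testssl.sh's multi-cert suffix format where IDs like
--     ``cert_notAfter`` become ``cert_notAfter <hostCert#1>``.
--     First tries exact match, then prefix match (id starts with target).
--     """
--     target_lower = target_id.lower()
--     # Exact match first
--     for f in findings:
--         if f.get("id", "").lower() == target_lower:
--             return f
--     # Prefix match (handles " <hostCert#N>" suffixes)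
--     for f in findings:
--         fid = f.get("id", "").lower()
--         if fid.startswith(target_lower) and (len(fid) == len(target_lower) or fid[len(target_lower)] in (" ", "_")):
--             return f
--     return None
--
-- def _evidence_str(entry: dict[str, Any] | None) -> str:
--     """Build evidence string from a testssl entry."""
--     if not entry:
--         return ""
--     return f"{entry.get('id', '')}: {entry.get('finding', '')} ({entry.get('severity', '')})"
--
-- def _check(
--     check_id: str,
--     title: str,
--     status: str,
--     detail: str,
--     evidence: str = "",
-- ) -> dict[str, Any]:
--     return {
--         "check_id": check_id,
--         "title": title,
--         "status": status,
--         "detail": detail,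
--         "evidence": evidence,
--     }
--
-- def _check_tls_versions(findings: list[dict[str, Any]]) -> list[dict[str, Any]]:
--     checks: list[dict[str, Any]] = []
--
--     # 2.1.1 TLS 1.2 offered
--     entry = _find(findings, "TLS1_2")
--     if entry:
--         offered = "offered" in entry.get("finding", "").lower()
--         checks.append(_check(
--             "2.1.1", "TLS 1.2 wird unterstützt",
--             "PASS" if offered else "FAIL",
--             "TLS 1.2 wird angeboten" if offered else "TLS 1.2 wird NICHT angeboten — Pflichtverstoß",
--             _evidence_str(entry),
--         ))
--     else:
--         checks.append(_check("2.1.1", "TLS 1.2 wird unterstützt", "N/A",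
--                              "Keine testssl-Daten für TLS 1.2 vorhanden"))
--
--     # 2.1.2 TLS 1.3 offered (WARN if not, since recommended)
--     entry = _find(findings, "TLS1_3")
--     if entry:
--         offered = "offered" in entry.get("finding", "").lower()
--         checks.append(_check(
--             "2.1.2", "TLS 1.3 wird unterstützt",
--             "PASS" if offered else "WARN",
--             "TLS 1.3 wird angeboten" if offered else "TLS 1.3 wird nicht angeboten (empfohlen)",
--             _evidence_str(entry),
--         ))
--     else:
--         checks.append(_check("2.1.2", "TLS 1.3 wird unterstützt", "N/A",
--                              "Keine testssl-Daten für TLS 1.3 vorhanden"))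
--
--     # 2.1.3-2.1.6: Legacy protocols must NOT be offered
--     legacy_checks = [
--         ("2.1.3", "SSLv2", "SSLv2 deaktiviert"),
--         ("2.1.4", "SSLv3", "SSLv3 deaktiviert"),
--         ("2.1.5", "TLS1", "TLS 1.0 deaktiviert"),
--         ("2.1.6", "TLS1_1", "TLS 1.1 deaktiviert"),
--     ]
--     for cid, tid, title in legacy_checks:
--         entry = _find(findings, tid)
--         if entry:
--             finding_text = entry.get("finding", "").lower()
--             not_offered = "not offered" in finding_text
--             checks.append(_check(
--                 cid, title,
--                 "PASS" if not_offered else "FAIL",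
--                 f"{tid} ist deaktiviert" if not_offered else f"{tid} ist noch aktiv — Pflichtverstoß",
--                 _evidence_str(entry),
--             ))
--         else:
--             checks.append(_check(cid, title, "N/A",
--                                  f"Keine testssl-Daten für {tid} vorhanden"))
--
--     return checks
-- ===== SOURCE B (Python) =====
-- from typing import Any
--
-- _TARGETS = ["TLS1_2", "TLS1_3", "SSLv2", "SSLv3", "TLS1", "TLS1_1"]
--
-- def _index(findings: list[dict[str, Any]]) -> tuple[dict[str, Any], dict[str, Any]]:
--     """ONE pass over the findings: for every target id remember the first exact
--     match and the first prefix match; the six repeated scans of _find disappear."""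
--     exact: dict[str, Any] = {}
--     prefix: dict[str, Any] = {}
--     for f in findings:
--         fid = f.get("id", "").lower()
--         for t in _TARGETS:
--             tl = t.lower()
--             if t not in exact and fid == tl:
--                 exact[t] = f
--             if t not in prefix and fid.startswith(tl) and (
--                     len(fid) == len(tl) or fid[len(tl)] in (" ", "_")):
--                 prefix[t] = f
--     return exact, prefix
--
-- def _check(check_id, title, status, detail, evidence=""):
--     return {
--         "check_id": check_id,
--         "title": title,
--         "status": status,
--         "detail": detail,
--         "evidence": evidence,
--     }
--
-- # (check_id, target_id, title, needle whose PRESENCE means PASS,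
-- #  negative status, positive detail, negative detail, N/A detail)
-- _TLS_SPECS = [
--     ("2.1.1", "TLS1_2", "TLS 1.2 wird unterstützt", "offered", "FAIL",
--      "TLS 1.2 wird angeboten", "TLS 1.2 wird NICHT angeboten — Pflichtverstoß",
--      "Keine testssl-Daten für TLS 1.2 vorhanden"),
--     ("2.1.2", "TLS1_3", "TLS 1.3 wird unterstützt", "offered", "WARN",
--      "TLS 1.3 wird angeboten", "TLS 1.3 wird nicht angeboten (empfohlen)",
--      "Keine testssl-Daten für TLS 1.3 vorhanden"),
--     ("2.1.3", "SSLv2", "SSLv2 deaktiviert", "not offered", "FAIL",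
--      "SSLv2 ist deaktiviert", "SSLv2 ist noch aktiv — Pflichtverstoß",
--      "Keine testssl-Daten für SSLv2 vorhanden"),
--     ("2.1.4", "SSLv3", "SSLv3 deaktiviert", "not offered", "FAIL",
--      "SSLv3 ist deaktiviert", "SSLv3 ist noch aktiv — Pflichtverstoß",
--      "Keine testssl-Daten für SSLv3 vorhanden"),
--     ("2.1.5", "TLS1", "TLS 1.0 deaktiviert", "not offered", "FAIL",
--      "TLS1 ist deaktiviert", "TLS1 ist noch aktiv — Pflichtverstoß",
--      "Keine testssl-Daten für TLS1 vorhanden"),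
--     ("2.1.6", "TLS1_1", "TLS 1.1 deaktiviert", "not offered", "FAIL",
--      "TLS1_1 ist deaktiviert", "TLS1_1 ist noch aktiv — Pflichtverstoß",
--      "Keine testssl-Daten für TLS1_1 vorhanden"),
-- ]
--
-- def _check_tls_versions(findings: list[dict[str, Any]]) -> list[dict[str, Any]]:
--     exact, prefix = _index(findings)
--     checks = []
--     for cid, tid, title, needle, neg_status, pos_detail, neg_detail, na_detail in _TLS_SPECS:
--         entry = exact.get(tid)
--         if entry is None:
--             entry = prefix.get(tid)
--         if entry is None:
--             checks.append(_check(cid, title, "N/A", na_detail))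
--         else:
--             good = needle in entry.get("finding", "").lower()
--             checks.append(_check(
--                 cid, title,
--                 "PASS" if good else neg_status,
--                 pos_detail if good else neg_detail,
--                 "%s: %s (%s)" % (entry.get("id", ""), entry.get("finding", ""),
--                                  entry.get("severity", "")),
--             ))
--     return checks
-- ===== Notes on version B (the rewrite author's own statement) =====
-- stated objective: alternative
-- what changed: Instead of calling _find six times (each scanning the findings twice), B makes ONE pass over the findings building two dicts (first exact match and first prefix match per target id) and then emits the six checks from a spec table by index lookup.
import Mathlib
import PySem

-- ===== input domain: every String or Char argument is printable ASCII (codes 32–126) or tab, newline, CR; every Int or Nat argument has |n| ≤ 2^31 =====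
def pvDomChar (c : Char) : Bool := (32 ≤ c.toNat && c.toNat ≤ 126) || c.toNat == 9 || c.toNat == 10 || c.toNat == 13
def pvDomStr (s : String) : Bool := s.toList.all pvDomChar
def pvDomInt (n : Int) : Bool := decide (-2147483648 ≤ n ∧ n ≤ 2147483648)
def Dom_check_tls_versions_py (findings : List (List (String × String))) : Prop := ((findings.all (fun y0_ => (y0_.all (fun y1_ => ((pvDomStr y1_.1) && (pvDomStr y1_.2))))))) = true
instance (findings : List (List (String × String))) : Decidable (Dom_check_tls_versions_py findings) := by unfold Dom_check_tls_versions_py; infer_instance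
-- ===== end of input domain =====

-- B replaces the six repeated _find scans by ONE indexing pass over the findings that
-- records, per target id, the first exact and the first prefix match (objective:
-- alternative decomposition); return values are identical.

-- ===== PORT A =====

-- f.get(k, "") on a dict ported as association list (unique keys): first match.
def pvGetD (d : List (String × String)) (k : String) : String :=
  match d with
  | [] => ""
  | (k', v) :: rest => if k' == k then v else pvGetD rest k

-- _find: exact-match scan, then prefix-match scan (both `for … return` loops = find?).
def pvFind (findings : List (List (String × String))) (target : String) :
    Option (List (String × String)) :=
  let tl := PySem.Str.lower target
  match findings.find? (fun f => PySem.Str.lower (pvGetD f "id") == tl) with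
  | some f => some f
  | none =>
    findings.find? (fun f =>
      let fid := PySem.Str.lower (pvGetD f "id")
      PySem.Str.startswith fid tl &&
        (PySem.Str.len fid == PySem.Str.len tl ||
         (PySem.Str.pyGet? fid (PySem.Str.len tl) == some ' ' ||
          PySem.Str.pyGet? fid (PySem.Str.len tl) == some '_')))

-- _evidence_str; `if not entry` is Python truthiness: None or the empty dict give "".
def pvEvidence (entry : Option (List (String × String))) : String :=
  match entry with
  | none => ""
  | some e =>
    if e.isEmpty then ""
    else pvGetD e "id" ++ ": " ++ pvGetD e "finding" ++ " (" ++ pvGetD e "severity" ++ ")"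

-- _check: the result dict, in insertion order.
def pvCheck (cid title status detail evidence : String) : List (String × String) :=
  [("check_id", cid), ("title", title), ("status", status),
   ("detail", detail), ("evidence", evidence)]

def check_tls_versions_py (findings : List (List (String × String))) :
    List (List (String × String)) :=
  -- 2.1.1 (if entry: … truthiness = some nonempty dict)
  let c1 :=
    match pvFind findings "TLS1_2" with
    | some entry =>
      if entry.isEmpty then
        pvCheck "2.1.1" "TLS 1.2 wird unterstützt" "N/A"
          "Keine testssl-Daten für TLS 1.2 vorhanden" ""
      else
        let offered := PySem.Str.isIn "offered" (PySem.Str.lower (pvGetD entry "finding"))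
        pvCheck "2.1.1" "TLS 1.2 wird unterstützt"
          (if offered then "PASS" else "FAIL")
          (if offered then "TLS 1.2 wird angeboten"
           else "TLS 1.2 wird NICHT angeboten — Pflichtverstoß")
          (pvEvidence (some entry))
    | none =>
      pvCheck "2.1.1" "TLS 1.2 wird unterstützt" "N/A"
        "Keine testssl-Daten für TLS 1.2 vorhanden" ""
  -- 2.1.2
  let c2 :=
    match pvFind findings "TLS1_3" with
    | some entry =>
      if entry.isEmpty then
        pvCheck "2.1.2" "TLS 1.3 wird unterstützt" "N/A"
          "Keine testssl-Daten für TLS 1.3 vorhanden" ""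
      else
        let offered := PySem.Str.isIn "offered" (PySem.Str.lower (pvGetD entry "finding"))
        pvCheck "2.1.2" "TLS 1.3 wird unterstützt"
          (if offered then "PASS" else "WARN")
          (if offered then "TLS 1.3 wird angeboten"
           else "TLS 1.3 wird nicht angeboten (empfohlen)")
          (pvEvidence (some entry))
    | none =>
      pvCheck "2.1.2" "TLS 1.3 wird unterstützt" "N/A"
        "Keine testssl-Daten für TLS 1.3 vorhanden" ""
  -- 2.1.3-2.1.6 legacy loop
  [c1, c2] ++
    ([("2.1.3", "SSLv2", "SSLv2 deaktiviert"),
      ("2.1.4", "SSLv3", "SSLv3 deaktiviert"),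
      ("2.1.5", "TLS1", "TLS 1.0 deaktiviert"),
      ("2.1.6", "TLS1_1", "TLS 1.1 deaktiviert")].map
      (fun r =>
        match pvFind findings r.2.1 with
        | some entry =>
          if entry.isEmpty then
            pvCheck r.1 r.2.2 "N/A" ("Keine testssl-Daten für " ++ r.2.1 ++ " vorhanden") ""
          else
            let notOffered :=
              PySem.Str.isIn "not offered" (PySem.Str.lower (pvGetD entry "finding"))
            pvCheck r.1 r.2.2
              (if notOffered then "PASS" else "FAIL")
              (if notOffered then r.2.1 ++ " ist deaktiviert"
               else r.2.1 ++ " ist noch aktiv — Pflichtverstoß")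
              (pvEvidence (some entry))
        | none =>
          pvCheck r.1 r.2.2 "N/A" ("Keine testssl-Daten für " ++ r.2.1 ++ " vorhanden") ""))

-- ===== PORT B =====

def pvTargets : List String := ["TLS1_2", "TLS1_3", "SSLv2", "SSLv3", "TLS1", "TLS1_1"]

-- _index: one pass over findings; the two dicts map target id -> first exact / first
-- prefix matching entry.
def pvIndex (findings : List (List (String × String))) :
    PySem.Dict String (List (String × String)) × PySem.Dict String (List (String × String)) :=
  findings.foldl (fun st f =>
    let fid := PySem.Str.lower (pvGetD f "id")
    pvTargets.foldl (fun st t =>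
      let tl := PySem.Str.lower t
      let e := if !(st.1.contains t) && (fid == tl) then st.1.insert t f else st.1
      let p := if !(st.2.contains t) &&
          (PySem.Str.startswith fid tl &&
            (PySem.Str.len fid == PySem.Str.len tl ||
             (PySem.Str.pyGet? fid (PySem.Str.len tl) == some ' ' ||
              PySem.Str.pyGet? fid (PySem.Str.len tl) == some '_')))
        then st.2.insert t f else st.2
      (e, p)) st)
    (PySem.Dict.empty, PySem.Dict.empty)

-- _TLS_SPECS: (check_id, target_id, title, needle, neg_status, pos_detail, neg_detail, na_detail)
def pvTlsSpecs :
    List (String × String × String × String × String × String × String × String) :=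
  [("2.1.1", "TLS1_2", "TLS 1.2 wird unterstützt", "offered", "FAIL",
    "TLS 1.2 wird angeboten", "TLS 1.2 wird NICHT angeboten — Pflichtverstoß",
    "Keine testssl-Daten für TLS 1.2 vorhanden"),
   ("2.1.2", "TLS1_3", "TLS 1.3 wird unterstützt", "offered", "WARN",
    "TLS 1.3 wird angeboten", "TLS 1.3 wird nicht angeboten (empfohlen)",
    "Keine testssl-Daten für TLS 1.3 vorhanden"),
   ("2.1.3", "SSLv2", "SSLv2 deaktiviert", "not offered", "FAIL",
    "SSLv2 ist deaktiviert", "SSLv2 ist noch aktiv — Pflichtverstoß",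
    "Keine testssl-Daten für SSLv2 vorhanden"),
   ("2.1.4", "SSLv3", "SSLv3 deaktiviert", "not offered", "FAIL",
    "SSLv3 ist deaktiviert", "SSLv3 ist noch aktiv — Pflichtverstoß",
    "Keine testssl-Daten für SSLv3 vorhanden"),
   ("2.1.5", "TLS1", "TLS 1.0 deaktiviert", "not offered", "FAIL",
    "TLS1 ist deaktiviert", "TLS1 ist noch aktiv — Pflichtverstoß",
    "Keine testssl-Daten für TLS1 vorhanden"),
   ("2.1.6", "TLS1_1", "TLS 1.1 deaktiviert", "not offered", "FAIL",
    "TLS1_1 ist deaktiviert", "TLS1_1 ist noch aktiv — Pflichtverstoß",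
    "Keine testssl-Daten für TLS1_1 vorhanden")]

def check_tls_versions_py_alt (findings : List (List (String × String))) :
    List (List (String × String)) :=
  let idx := pvIndex findings
  pvTlsSpecs.map (fun s =>
    let entry :=
      match idx.1.get? s.2.1 with
      | some e => some e
      | none => idx.2.get? s.2.1
    match entry with
    | none => pvCheck s.1 s.2.2.1 "N/A" s.2.2.2.2.2.2.2 ""
    | some entry =>
      let good := PySem.Str.isIn s.2.2.2.1 (PySem.Str.lower (pvGetD entry "finding"))
      pvCheck s.1 s.2.2.1
        (if good then "PASS" else s.2.2.2.2.1)
        (if good then s.2.2.2.2.2.1 else s.2.2.2.2.2.2.1)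
        (pvGetD entry "id" ++ ": " ++ pvGetD entry "finding" ++ " (" ++
         pvGetD entry "severity" ++ ")"))

-- ===== PRECONDITION & SPEC =====
def Spec_check_tls_versions_py (findings : List (List (String × String))) (out : List (List (String × String))) : Prop := out = check_tls_versions_py_alt findings
instance (findings : List (List (String × String))) (out : List (List (String × String))) : Decidable (Spec_check_tls_versions_py findings out) := by unfold Spec_check_tls_versions_py; infer_instance

-- ===== CLAIM (what is proved, stated in full; the proofs are below) =====
def Claim_equal_check_tls_versions_py : Prop := ∀ (findings : List (List (String × String))), Dom_check_tls_versions_py findings → Spec_check_tls_versions_py findings (check_tls_versions_py findings)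

-- ===== LEMMAS AND PROOFS =====

-- the single-key update of the indexing loop, abstracted over the hit predicate
def pvUpd (pred : String → Bool) (f : List (String × String))
    (d : PySem.Dict String (List (String × String))) (t : String) :
    PySem.Dict String (List (String × String)) :=
  if !(d.contains t) && pred t then d.insert t f else d

def pvExactPred (f : List (String × String)) (t : String) : Bool :=
  PySem.Str.lower (pvGetD f "id") == PySem.Str.lower t

def pvPrefixPred (f : List (String × String)) (t : String) : Bool :=
  let fid := PySem.Str.lower (pvGetD f "id")
  let tl := PySem.Str.lower t
  PySem.Str.startswith fid tl &&
    (PySem.Str.len fid == PySem.Str.len tl ||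
     (PySem.Str.pyGet? fid (PySem.Str.len tl) == some ' ' ||
      PySem.Str.pyGet? fid (PySem.Str.len tl) == some '_'))

-- the componentwise inner fold splits into two independent folds
theorem pvInner_split (f : List (String × String)) (ts : List String)
    (st : PySem.Dict String (List (String × String)) × PySem.Dict String (List (String × String))) :
    ts.foldl (fun st t => (pvUpd (pvExactPred f) f st.1 t, pvUpd (pvPrefixPred f) f st.2 t)) st
      = (ts.foldl (pvUpd (pvExactPred f) f) st.1, ts.foldl (pvUpd (pvPrefixPred f) f) st.2) := by
  induction ts generalizing st with
  | nil => rfl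
  | cons t ts ih => simp [List.foldl, ih]

-- effect of one finding's inner fold on a single key
theorem get?_foldl_upd (pred : String → Bool) (f : List (String × String))
    (ts : List String) (d : PySem.Dict String (List (String × String))) (t : String) :
    (ts.foldl (pvUpd pred f) d).get? t =
      if t ∈ ts ∧ d.get? t = none ∧ pred t = true then some f else d.get? t := by
  induction ts generalizing d with
  | nil => simp
  | cons t' ts ih =>
    rw [List.foldl_cons, ih]
    have hupd : (pvUpd pred f d t').get? t =
        if t = t' ∧ d.get? t = none ∧ pred t = true then some f else d.get? t := by
      unfold pvUpd
      by_cases ht : t = t'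
      · subst ht
        rw [PySem.Dict.contains_eq_isSome_get?]
        cases hd : d.get? t with
        | none =>
          by_cases hp : pred t = true
          · simp [hp, PySem.Dict.get?_insert_self]
          · simp only [Bool.not_eq_true] at hp; simp [hd, hp]
        | some v => simp [hd]
      · split
        · rw [PySem.Dict.get?_insert_of_ne _ _ ht]; simp [ht]
        · simp [ht]
    rw [hupd]
    by_cases ht : t = t' <;> by_cases hp : pred t = true <;>
      cases hd : d.get? t <;> simp [ht, hd, hp, List.mem_cons]

-- the whole indexing fold on one dict computes find? of the predicate
theorem get?_index_fold (pred : List (String × String) → String → Bool)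
    (l : List (List (String × String))) (d : PySem.Dict String (List (String × String)))
    (t : String) (ht : t ∈ pvTargets) :
    (l.foldl (fun d f => pvTargets.foldl (pvUpd (pred f) f) d) d).get? t =
      (match d.get? t with
       | some v => some v
       | none => l.find? (fun f => pred f t)) := by
  induction l generalizing d with
  | nil => cases hd : d.get? t <;> simp [hd]
  | cons f fs ih =>
    rw [List.foldl_cons, ih, get?_foldl_upd]
    rw [List.find?_cons]
    cases hd : d.get? t with
    | some v => simp [hd]
    | none =>
      by_cases hp : pred f t = true
      · simp [hd, ht, hp]
      · simp at hp
        simp [hd, ht, hp]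

-- B's index lookup chain is exactly A's _find, for every target in the table
theorem pvIndex_eq_pvFind (findings : List (List (String × String))) (t : String)
    (ht : t ∈ pvTargets) :
    (match (pvIndex findings).1.get? t with
     | some e => some e
     | none => (pvIndex findings).2.get? t) = pvFind findings t := by
  have hsplit : pvIndex findings =
      (findings.foldl (fun d f => pvTargets.foldl (pvUpd (pvExactPred f) f) d) PySem.Dict.empty,
       findings.foldl (fun d f => pvTargets.foldl (pvUpd (pvPrefixPred f) f) d) PySem.Dict.empty) := by
    unfold pvIndex
    have : ∀ (l : List (List (String × String)))
        (st : PySem.Dict String (List (String × String)) × PySem.Dict String (List (String × String))),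
        l.foldl (fun st f =>
          pvTargets.foldl (fun st t => (pvUpd (pvExactPred f) f st.1 t, pvUpd (pvPrefixPred f) f st.2 t)) st) st
        = (l.foldl (fun d f => pvTargets.foldl (pvUpd (pvExactPred f) f) d) st.1,
           l.foldl (fun d f => pvTargets.foldl (pvUpd (pvPrefixPred f) f) d) st.2) := by
      intro l
      induction l with
      | nil => intro st; rfl
      | cons f fs ih => intro st; rw [List.foldl_cons, ih, pvInner_split]; rfl
    exact this findings (PySem.Dict.empty, PySem.Dict.empty)
  rw [hsplit]
  simp only
  rw [get?_index_fold _ _ _ _ ht, get?_index_fold _ _ _ _ ht]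
  simp only [PySem.Dict.get?_empty]
  unfold pvFind pvExactPred pvPrefixPred
  rfl

-- _find with a target whose lowercased form is a nonempty string never returns the
-- empty (falsy) dict: an empty dict's id "" neither equals nor starts a nonempty target.
theorem pvFind_some_ne_nil (findings : List (List (String × String))) (t : String)
    (e : List (String × String))
    (h1 : (PySem.Str.lower (pvGetD [] "id") == PySem.Str.lower t) = false)
    (h2 : PySem.Str.startswith (PySem.Str.lower (pvGetD [] "id")) (PySem.Str.lower t) = false)
    (h : pvFind findings t = some e) : e ≠ [] := by
  rintro rfl
  unfold pvFind at h
  simp only at h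
  cases hf : findings.find? (fun f => PySem.Str.lower (pvGetD f "id") == PySem.Str.lower t) with
  | some f =>
    rw [hf] at h
    cases h
    have := List.find?_some hf
    rw [h1] at this
    exact Bool.false_ne_true this
  | none =>
    rw [hf] at h
    have := List.find?_some h
    simp only [h2, Bool.false_and] at this
    exact Bool.false_ne_true this

-- ===== VERDICT (by name: the statement is the Claim_ definition above) =====
theorem check_tls_versions_py_spec : Claim_equal_check_tls_versions_py := by
  intro findings _
  unfold Spec_check_tls_versions_py check_tls_versions_py check_tls_versions_py_alt pvTlsSpecs
  simp only [List.map, List.cons_append, List.nil_append]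
  refine congrArg₂ List.cons ?_ (congrArg₂ List.cons ?_ (congrArg₂ List.cons ?_
    (congrArg₂ List.cons ?_ (congrArg₂ List.cons ?_ (congrArg₂ List.cons ?_ rfl)))))
  · rw [pvIndex_eq_pvFind findings "TLS1_2" (by decide)]
    cases hf : pvFind findings "TLS1_2" with
    | none => rfl
    | some e =>
      have h0 : e.isEmpty = false :=
        List.isEmpty_eq_false_iff.mpr (pvFind_some_ne_nil findings "TLS1_2" e (by decide) (by decide) hf)
      dsimp only
      rw [h0]
      simp [pvEvidence, h0]
  · rw [pvIndex_eq_pvFind findings "TLS1_3" (by decide)]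
    cases hf : pvFind findings "TLS1_3" with
    | none => rfl
    | some e =>
      have h0 : e.isEmpty = false :=
        List.isEmpty_eq_false_iff.mpr (pvFind_some_ne_nil findings "TLS1_3" e (by decide) (by decide) hf)
      dsimp only
      rw [h0]
      simp [pvEvidence, h0]
  · rw [pvIndex_eq_pvFind findings "SSLv2" (by decide)]
    cases hf : pvFind findings "SSLv2" with
    | none => rfl
    | some e =>
      have h0 : e.isEmpty = false :=
        List.isEmpty_eq_false_iff.mpr (pvFind_some_ne_nil findings "SSLv2" e (by decide) (by decide) hf)
      dsimp only
      rw [h0]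
      simp [pvEvidence, h0]
  · rw [pvIndex_eq_pvFind findings "SSLv3" (by decide)]
    cases hf : pvFind findings "SSLv3" with
    | none => rfl
    | some e =>
      have h0 : e.isEmpty = false :=
        List.isEmpty_eq_false_iff.mpr (pvFind_some_ne_nil findings "SSLv3" e (by decide) (by decide) hf)
      dsimp only
      rw [h0]
      simp [pvEvidence, h0]
  · rw [pvIndex_eq_pvFind findings "TLS1" (by decide)]
    cases hf : pvFind findings "TLS1" with
    | none => rfl
    | some e =>
      have h0 : e.isEmpty = false :=
        List.isEmpty_eq_false_iff.mpr (pvFind_some_ne_nil findings "TLS1" e (by decide) (by decide) hf)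
      dsimp only
      rw [h0]
      simp [pvEvidence, h0]
  · rw [pvIndex_eq_pvFind findings "TLS1_1" (by decide)]
    cases hf : pvFind findings "TLS1_1" with
    | none => rfl
    | some e =>
      have h0 : e.isEmpty = false :=
        List.isEmpty_eq_false_iff.mpr (pvFind_some_ne_nil findings "TLS1_1" e (by decide) (by decide) hf)
      dsimp only
      rw [h0]
      simp [pvEvidence, h0]
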